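-- pv_equiv track=rewrite | github.com/AjayJakhar97/PythonCourse | Later/Day24 - Project/14-Find K Pairs with Smallest Sums.py | MyFunc_GetIndex_SmallestSum
-- ===== SOURCE A (Python) =====
-- def MyFunc_GetIndex_SmallestSum(num1, num2, k):
--     counter = 1
--     result = []
--
--     for i in range(len(num1)):
--         for j in range(len(num2)):
--             if counter <= k:
--                 result.append([i, j])
--                 counter += 1
--     return result
-- ===== SOURCE B (Python) =====
-- def MyFunc_GetIndex_SmallestSum(num1, num2, k):
--     n, m = len(num1), len(num2)
--     t = min(k, n * m)
--     if t <= 0: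
--         return []
--     return [[idx // m, idx % m] for idx in range(t)]
-- ===== Notes on version B (the rewrite author's own statement) =====
-- stated objective: faster
-- what changed: Instead of scanning all n*m index pairs with a counter, B computes t = min(k, n*m) and generates the first t pairs directly by divmod over range(t).
import Mathlib
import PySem

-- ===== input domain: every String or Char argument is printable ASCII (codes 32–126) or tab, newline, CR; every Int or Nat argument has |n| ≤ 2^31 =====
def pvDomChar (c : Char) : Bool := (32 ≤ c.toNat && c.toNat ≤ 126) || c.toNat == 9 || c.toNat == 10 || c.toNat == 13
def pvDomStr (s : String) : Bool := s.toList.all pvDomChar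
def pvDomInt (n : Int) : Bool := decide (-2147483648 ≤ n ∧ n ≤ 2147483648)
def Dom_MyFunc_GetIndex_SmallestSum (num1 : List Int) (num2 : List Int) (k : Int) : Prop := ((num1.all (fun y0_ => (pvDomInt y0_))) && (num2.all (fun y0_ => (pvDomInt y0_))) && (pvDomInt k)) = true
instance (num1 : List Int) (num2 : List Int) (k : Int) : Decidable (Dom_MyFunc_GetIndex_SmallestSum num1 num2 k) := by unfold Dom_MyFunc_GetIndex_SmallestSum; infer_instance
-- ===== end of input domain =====

-- B replaces A's full O(n*m) double scan with a counter by directly generating the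
-- first min(k, n*m) row-major index pairs via divmod (objective: faster, O(min(k, n*m))).

-- ===== PORT A =====
def MyFunc_GetIndex_SmallestSum (num1 : List Int) (num2 : List Int) (k : Int) : List (List Int) :=
  ((List.range num1.length).foldl (fun st (i : Nat) =>
      (List.range num2.length).foldl (fun st (j : Nat) =>
        if st.1 ≤ k then (st.1 + 1, st.2 ++ [[(i : Int), (j : Int)]]) else st) st)
    ((1 : Int), ([] : List (List Int)))).2

-- ===== PORT B =====
def MyFunc_GetIndex_SmallestSum_alt (num1 : List Int) (num2 : List Int) (k : Int) : List (List Int) :=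
  let m : Int := (num2.length : Int)
  let t : Int := min k ((num1.length : Int) * m)
  if t ≤ 0 then []
  else (List.range t.toNat).map (fun (idx : Nat) => [PySem.Int.floordiv (idx : Int) m, PySem.Int.mod (idx : Int) m])

-- ===== PRECONDITION & SPEC =====
def Spec_MyFunc_GetIndex_SmallestSum (num1 : List Int) (num2 : List Int) (k : Int) (out : List (List Int)) : Prop := out = MyFunc_GetIndex_SmallestSum_alt num1 num2 k
instance (num1 : List Int) (num2 : List Int) (k : Int) (out : List (List Int)) : Decidable (Spec_MyFunc_GetIndex_SmallestSum num1 num2 k out) := by unfold Spec_MyFunc_GetIndex_SmallestSum; infer_instance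

-- ===== CLAIM (what is proved, stated in full; the proofs are below) =====
def Claim_equal_MyFunc_GetIndex_SmallestSum : Prop := ∀ (num1 : List Int) (num2 : List Int) (k : Int), Dom_MyFunc_GetIndex_SmallestSum num1 num2 k → Spec_MyFunc_GetIndex_SmallestSum num1 num2 k (MyFunc_GetIndex_SmallestSum num1 num2 k)

-- ===== LEMMAS AND PROOFS =====

-- A's conditional-append fold over any list appends exactly the first min(len, (k+1-c).toNat) items.
theorem pvCondFold (k : Int) : ∀ (l : List (List Int)) (c : Int) (res : List (List Int)),
    l.foldl (fun st x => if st.1 ≤ k then (st.1 + 1, st.2 ++ [x]) else st) (c, res)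
      = (c + ((min l.length (k + 1 - c).toNat : Nat) : Int),
         res ++ l.take (min l.length (k + 1 - c).toNat)) := by
  intro l
  induction l with
  | nil => intro c res; simp
  | cons x l ih =>
    intro c res
    by_cases h : c ≤ k
    · have h1 : min (x :: l).length (k + 1 - c).toNat
          = min l.length (k + 1 - (c + 1)).toNat + 1 := by
        simp only [List.length_cons]; omega
      simp only [List.foldl_cons, if_pos h, ih (c + 1) (res ++ [x]), h1]
      refine (Prod.mk.injEq _ _ _ _).mpr ⟨by push_cast; ring, by simp [List.take_succ_cons]⟩
    · have h1 : min (x :: l).length (k + 1 - c).toNat = 0 := by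
        simp only [List.length_cons]; omega
      have h2 : min l.length (k + 1 - c).toNat = 0 := by omega
      simp only [List.foldl_cons, if_neg h, ih c res, h1, h2]
      simp

-- the row-major list of index pairs
def pvRowMajor (n m : Nat) : List (List Int) :=
  ((List.range n).map (fun (i : Nat) => (List.range m).map (fun (j : Nat) => [(i : Int), (j : Int)]))).flatten

theorem pvRowMajor_eq_map (n m : Nat) :
    pvRowMajor n m = (List.range (n * m)).map
      (fun idx => [((idx / m : Nat) : Int), ((idx % m : Nat) : Int)]) := by
  induction n with
  | zero => simp [pvRowMajor]
  | succ n ih =>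
    rcases Nat.eq_zero_or_pos m with hm | hm
    · subst hm; simp [pvRowMajor]
    · have : (n + 1) * m = n * m + m := by ring
      rw [pvRowMajor, List.range_succ, List.map_append, List.flatten_append, ← pvRowMajor, ih,
        this, List.range_add, List.map_append, List.map_map]
      congr 1
      simp only [List.map_cons, List.map_nil, List.flatten_cons, List.flatten_nil,
        List.append_nil]
      refine List.map_congr_left ?_
      intro j hj
      simp only [Function.comp]
      have hj' : j < m := List.mem_range.mp hj
      have hd : (n * m + j) / m = n := by
        rw [Nat.add_comm, Nat.mul_comm, Nat.add_mul_div_left _ _ hm, Nat.div_eq_of_lt hj', Nat.zero_add]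
      have hmod : (n * m + j) % m = j := by
        rw [Nat.add_comm (n*m), Nat.mul_comm, Nat.add_mul_mod_self_left]
        exact Nat.mod_eq_of_lt hj'
      rw [hd, hmod]

-- A equals the first k.toNat pairs of the row-major list
theorem pvA_eq_take (num1 num2 : List Int) (k : Int) :
    MyFunc_GetIndex_SmallestSum num1 num2 k
      = (pvRowMajor num1.length num2.length).take k.toNat := by
  unfold MyFunc_GetIndex_SmallestSum pvRowMajor
  have hinner : ∀ (st : Int × List (List Int)) (i : Nat),
      (List.range num2.length).foldl (fun st (j : Nat) =>
        if st.1 ≤ k then (st.1 + 1, st.2 ++ [[(i : Int), (j : Int)]]) else st) st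
      = ((List.range num2.length).map (fun (j : Nat) => [(i : Int), (j : Int)])).foldl
          (fun st x => if st.1 ≤ k then (st.1 + 1, st.2 ++ [x]) else st) st := by
    intro st i; rw [List.foldl_map]
  simp only [hinner]
  rw [← List.foldl_map, ← List.foldl_flatten, pvCondFold]
  have h1 : (k + 1 - 1).toNat = k.toNat := by omega
  rw [h1]
  set L := ((List.range num1.length).map
    (fun (i : Nat) => (List.range num2.length).map (fun (j : Nat) => [(i : Int), (j : Int)]))).flatten
  simp only [List.nil_append]
  rw [min_comm, ← List.take_take, List.take_length]

-- B equals the same prefix of the row-major list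
theorem pvAlt_eq_take (num1 num2 : List Int) (k : Int) :
    MyFunc_GetIndex_SmallestSum_alt num1 num2 k
      = (pvRowMajor num1.length num2.length).take k.toNat := by
  unfold MyFunc_GetIndex_SmallestSum_alt
  rw [pvRowMajor_eq_map]
  have hcast : ((num1.length * num2.length : Nat) : Int)
      = (num1.length : Int) * (num2.length : Int) := by push_cast; ring
  by_cases ht : min k ((num1.length : Int) * (num2.length : Int)) ≤ 0
  · simp only [if_pos ht]
    rcases min_le_iff.mp ht with hk | hnm
    · rw [Int.toNat_of_nonpos hk]; simp
    · have h0 : num1.length * num2.length = 0 := by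
        rw [← hcast] at hnm; omega
      simp [h0]
  · simp only [if_neg ht]
    have htn : (min k ((num1.length : Int) * (num2.length : Int))).toNat
        = min k.toNat (num1.length * num2.length) := by
      rw [← hcast]; omega
    rw [htn, ← List.map_take, List.take_range]
    refine List.map_congr_left ?_
    intro idx _
    simp [PySem.Int.floordiv_natCast, PySem.Int.mod_natCast]

-- ===== VERDICT (by name: the statement is the Claim_ definition above) =====
theorem MyFunc_GetIndex_SmallestSum_spec : Claim_equal_MyFunc_GetIndex_SmallestSum := by
  intro num1 num2 k _
  unfold Spec_MyFunc_GetIndex_SmallestSum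
  rw [pvA_eq_take, pvAlt_eq_take]
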